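-- pv_equiv track=rewrite | github.com/saloaaro/TIRA1 | alternation.py | count
-- ===== SOURCE A (Python) =====
-- def count(t):
--     n = len(t)
--     count = n
--
--     for i in range(2, n):
--         j = 0
--         while i + j < n:
--             if (t[i + j] < t[i + j - 1] and t[i + j] < t[i + j - 2]) or (t[i + j] > t[i + j - 1] and t[i + j] > t[i + j - 2]):
--                 count += 1
--                 j += 1
--             else:
--                 break
--
--     return count
-- ===== SOURCE B (Python) =====
-- def count(t):
--     # One reverse pass: run-length of consecutive zigzag positions, summed.
--     n = len(t)
--     total = n
--     run = 0
--     for k in range(n - 1, 1, -1):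
--         if (t[k] < t[k-1] and t[k] < t[k-2]) or (t[k] > t[k-1] and t[k] > t[k-2]):
--             run += 1
--         else:
--             run = 0
--         total += run
--     return total
-- ===== Notes on version B (the rewrite author's own statement) =====
-- stated objective: faster
-- what changed: Replaced the per-start-index rescan (a fresh while-loop walking each zigzag run from every i) with a single right-to-left pass that maintains the current run length and accumulates it, so each position is examined once.
import Mathlib
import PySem

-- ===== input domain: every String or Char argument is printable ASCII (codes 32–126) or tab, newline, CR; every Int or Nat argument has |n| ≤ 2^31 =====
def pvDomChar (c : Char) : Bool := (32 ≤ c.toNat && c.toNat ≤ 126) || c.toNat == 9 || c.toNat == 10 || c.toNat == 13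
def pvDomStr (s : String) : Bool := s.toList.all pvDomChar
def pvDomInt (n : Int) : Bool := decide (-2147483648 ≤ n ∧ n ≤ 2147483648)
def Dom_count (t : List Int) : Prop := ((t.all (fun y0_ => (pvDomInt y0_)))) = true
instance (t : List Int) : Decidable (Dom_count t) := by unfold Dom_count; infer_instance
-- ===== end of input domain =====

-- B replaces A's per-start rescan by one reverse pass over run lengths (objective: faster).

-- zigzag test at position k — the identical condition both Pythons write inline;
-- both programs only evaluate it with 2 ≤ k < len t, so pyGetD's default 0 is never used.
def zok (t : List Int) (k : Int) : Bool :=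
  let x := PySem.List.pyGetD t k 0
  let p := PySem.List.pyGetD t (k - 1) 0
  let q := PySem.List.pyGetD t (k - 2) 0
  (decide (x < p) && decide (x < q)) || (decide (x > p) && decide (x > q))

-- ===== PORT A =====
-- the inner 'while i + j < n' loop of A
def countInner (t : List Int) (n i j : Nat) (c : Int) : Int :=
  if _h : i + j < n then
    if zok t ((i : Int) + j) then countInner t n i (j + 1) (c + 1) else c
  else c
termination_by n - (i + j)
decreasing_by omega

def count (t : List Int) : Int :=
  (PySem.List.pyRange 2 (t.length : Int) 1).foldl
    (fun c i => countInner t t.length i.toNat 0 c) (t.length : Int)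

-- ===== PORT B =====
-- reverse pass 'for k in range(n-1, 1, -1)' carrying the pair (total, run)
def count_alt (t : List Int) : Int :=
  ((PySem.List.pyRange ((t.length : Int) - 1) 1 (-1)).foldl
    (fun (st : Int × Int) k =>
      let run := if zok t k then st.2 + 1 else 0
      (st.1 + run, run))
    ((t.length : Int), 0)).1

-- ===== PRECONDITION & SPEC =====
def Spec_count (t : List Int) (out : Int) : Prop := out = count_alt t
instance (t : List Int) (out : Int) : Decidable (Spec_count t out) := by unfold Spec_count; infer_instance

-- ===== CLAIM (what is proved, stated in full; the proofs are below) =====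
def Claim_equal_count : Prop := ∀ (t : List Int), Dom_count t → Spec_count t (count t)

-- ===== LEMMAS AND PROOFS =====

-- length of the maximal zigzag run starting at position k (cut at n)
def runLen (t : List Int) (n k : Nat) : Nat :=
  if _h : k < n then
    if zok t (k : Int) then runLen t n (k + 1) + 1 else 0
  else 0
termination_by n - k
decreasing_by omega

theorem countInner_eq (t : List Int) (n : Nat) :
    ∀ i j (c : Int), countInner t n i j c = c + runLen t n (i + j) := by
  intro i j c
  induction hm : n - (i + j) using Nat.strong_induction_on generalizing j c with
  | _ m ih =>
    rw [countInner, runLen]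
    by_cases h : i + j < n
    · simp only [dif_pos h]
      have hz : ((i : Int) + j) = ((i + j : Nat) : Int) := by push_cast; ring
      rw [hz]
      by_cases hc : zok t ((i + j : Nat) : Int)
      · rw [if_pos hc, if_pos hc,
          ih (n - (i + (j + 1))) (by omega) (j + 1) (c + 1) rfl]
        have : i + (j + 1) = i + j + 1 := by omega
        rw [this]; push_cast; ring
      · rw [if_neg hc, if_neg hc]; ring
    · simp [dif_neg h]

theorem count_eq_sum (t : List Int) :
    count t = (t.length : Int) +
      ((List.range (t.length - 2)).map (fun k => (runLen t t.length (2 + k) : Int))).sum := by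
  unfold count
  rw [PySem.List.pyRange_one]
  have h2 : ((t.length : Int) - 2).toNat = t.length - 2 := by omega
  rw [h2, List.foldl_map]
  calc (List.range (t.length - 2)).foldl
        (fun (c : Int) (k : Nat) => countInner t t.length ((2 : Int) + (k : Int)).toNat 0 c)
        (t.length : Int)
      = (List.range (t.length - 2)).foldl
        (fun (c : Int) (k : Nat) => c + (runLen t t.length (2 + k) : Int)) (t.length : Int) := by
        apply List.foldl_ext
        intro c k _
        have h3 : ((2 : Int) + (k : Int)).toNat = 2 + k := by omega
        rw [h3, countInner_eq]
        norm_num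
    _ = _ := by rw [PySem.List.foldl_add]

-- the B-side fold as a foldr over an ascending Nat range
theorem alt_core (t : List Int) (n : Nat) :
    ∀ m, 2 + m ≤ n → ∀ c : Int,
      (List.range m).foldr
        (fun (k : Nat) (st : Int × Int) =>
          let run := if zok t ((2 : Int) + (k : Int)) then st.2 + 1 else 0
          (st.1 + run, run))
        (c, (runLen t n (2 + m) : Int))
      = (c + ((List.range m).map (fun k => (runLen t n (2 + k) : Int))).sum,
         (runLen t n 2 : Int)) := by
  intro m
  induction m with
  | zero => intro _ c; simp
  | succ m ih =>
    intro hle c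
    rw [List.range_succ, List.foldr_append]
    simp only [List.foldr_cons, List.foldr_nil]
    have hcast : ((2 : Int) + (m : Int)) = ((2 + m : Nat) : Int) := by push_cast; ring
    have hrl : runLen t n (2 + m)
        = if zok t ((2 + m : Nat) : Int) then runLen t n (2 + (m + 1)) + 1 else 0 := by
      rw [runLen, dif_pos (by omega)]
      have h1 : 2 + m + 1 = 2 + (m + 1) := by omega
      rw [h1]
    have hrun : (if zok t ((2 : Int) + (m : Int)) then (runLen t n (2 + (m + 1)) : Int) + 1 else 0)
        = (runLen t n (2 + m) : Int) := by
      rw [hcast]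
      by_cases hc : zok t ((2 + m : Nat) : Int)
      · rw [if_pos hc, hrl, if_pos hc]; push_cast; ring
      · rw [if_neg hc, hrl, if_neg hc]; simp
    rw [hrun, ih (by omega) (c + (runLen t n (2 + m) : Int))]
    rw [List.map_append, List.sum_append]
    simp
    ring

theorem count_alt_eq_sum (t : List Int) :
    count_alt t = (t.length : Int) +
      ((List.range (t.length - 2)).map (fun k => (runLen t t.length (2 + k) : Int))).sum := by
  unfold count_alt
  by_cases hn : t.length < 2
  · rw [PySem.List.pyRange_neg_one_eq_nil (by omega)]
    have : t.length - 2 = 0 := by omega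
    simp [this]
  · push Not at hn
    have hrev : PySem.List.pyRange ((t.length : Int) - 1) 1 (-1)
        = (PySem.List.pyRange 2 (t.length : Int) 1).reverse := by
      rw [PySem.List.pyRange_neg_one_eq_reverse]
      norm_num
    rw [hrev, List.foldl_reverse, PySem.List.pyRange_one]
    have h2 : ((t.length : Int) - 2).toNat = t.length - 2 := by omega
    rw [h2, List.foldr_map]
    have hzero : runLen t t.length (2 + (t.length - 2)) = 0 := by
      rw [runLen, dif_neg (by omega)]
    have hc := alt_core t t.length (t.length - 2) (by omega) (t.length : Int)
    rw [hzero] at hc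
    simp only [Int.natCast_zero] at hc
    rw [hc]

-- ===== VERDICT (by name: the statement is the Claim_ definition above) =====
theorem count_spec : Claim_equal_count := by
  intro t _
  unfold Spec_count
  rw [count_eq_sum, count_alt_eq_sum]
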